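-- pv_equiv track=rewrite | github.com/joaopsgodoi/Most-Pleasant-Itineraries | itineraries_v3.py | itineraries_v3
-- ===== SOURCE A (Python) =====
-- def find_v3(parent, noise, v):
--     if parent[v - 1] == v:
--         return v
--     else:
--         p = parent[v - 1]
--         r = find_v3(parent, noise, p)
--         # We make sure that we update the list noise so in the end noise[v-1] should contains the maximum noise on its path to the vertex find(v).
--         #the 'if' bellow it's just to make sure that we really calculated the noise in the path from v to its representant r
--         if p != r:
--             noise[v - 1] = max(noise[p - 1], noise[v - 1])
--         parent[v-1]=r
--         return r
--
-- def itineraries_v3(V, AdjList, queries, l):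
--     n = len(V)
--     parent = [-1]*n
--     noise = [0]*n
--     vertexSeen = [False]*n
--     result = [0] * l
--     LCA = [[] for _ in range(n)]
--     # LCA[r] is a list of couples (u,v) such that LCA of (u,v) is r
--     TarjanLCA(V, AdjList, queries, l, parent, noise, vertexSeen, result, LCA, V[0], -1)
--     return result
--
-- def TarjanLCA(V, AdjList, queries, l, parent, noise, vertexSeen, result, LCA, u, p):
--     parent[u - 1] = u
--     for (v, w) in AdjList[u]:
--         if v != p:
--             noise[v - 1] = w
--             TarjanLCA(V, AdjList, queries, l, parent, noise, vertexSeen, result, LCA, v, u)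
--             parent[v-1] = u
--     vertexSeen[u - 1] = True
--     for (v, i) in queries[u-1]:
--         if vertexSeen[v - 1]:
--             lca = find_v3(parent, noise, v)
--             LCA[lca - 1].append((u, v, i))
--     for (x, y, i) in LCA[u - 1]:
--         if x == y:
--             result[i] = 0
--         else:
--             find_v3(parent, noise, x)
--             if y == u:
--                 result[i] = noise[x - 1]
--             else:
--                 result[i] = max(noise[x - 1], noise[y - 1])
-- ===== SOURCE B (Python) =====
-- # B: a two-stage re-implementation. Stage 1 computes the whole DFS schedule of the
-- # tree as a flat event list with an explicit stack (no state arrays touched yet);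
-- # stage 2 replays the events with an iterative two-pass (walk-then-compress) find.
-- def itineraries_v3(V, AdjList, queries, l):
--     n = len(V)
--     u0 = V[0]
--     # stage 1: build the event schedule
--     ev = []
--     stack = [(u0, -1, 0)]
--     while stack:
--         u, p, k = stack.pop()
--         adj = AdjList[u]
--         if k < len(adj):
--             v, w = adj[k]
--             stack.append((u, p, k + 1))
--             if v != p:
--                 ev.append((1, v, w))   # noise[v-1] = w
--                 ev.append((0, v, 0))   # parent[v-1] = v
--                 stack.append((v, u, 0))
--         else:
--             ev.append((3, u, 0))       # finish u
--             if stack: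
--                 ev.append((2, u, stack[-1][0]))  # parent[u-1] = caller
--
--     parent = [-1] * n
--     noise = [0] * n
--     seen = [False] * n
--     result = [0] * l
--     LCA = [[] for _ in range(n)]
--     parent[u0 - 1] = u0
--
--     def find(v):
--         # pass 1: walk to the representative, recording (vertex, parent) pairs
--         chain = []
--         x = v
--         while parent[x - 1] != x:
--             chain.append((x, parent[x - 1]))
--             x = parent[x - 1]
--         r = x
--         # pass 2: compress top-down with a running maximum
--         for (y, p) in reversed(chain):
--             if p != r:
--                 noise[y - 1] = max(noise[p - 1], noise[y - 1])
--             parent[y - 1] = r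
--         return r
--
--     # stage 2: replay the schedule
--     for (tag, a, b) in ev:
--         if tag == 1:
--             noise[a - 1] = b
--         elif tag == 0:
--             parent[a - 1] = a
--         elif tag == 2:
--             parent[a - 1] = b
--         else:
--             u = a
--             seen[u - 1] = True
--             fired = [(v, i) for (v, i) in queries[u - 1] if seen[v - 1]]
--             for (v, i) in fired:
--                 r = find(v)
--                 LCA[r - 1].append((u, v, i))
--             for (x, y, i) in LCA[u - 1]:
--                 if x == y:
--                     result[i] = 0
--                 else:
--                     find(x)
--                     if y == u:
--                         result[i] = noise[x - 1]
--                     else: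
--                         result[i] = max(noise[x - 1], noise[y - 1])
--     return result
-- ===== Notes on version B (the rewrite author's own statement) =====
-- stated objective: alternative
-- what changed: A's single recursive Tarjan DFS that interleaves traversal with union-find work is split into two staged passes: stage 1 builds the whole DFS schedule as a flat event list with an explicit stack, stage 2 replays the events over the arrays, with A's recursive path-compressing find replaced by an iterative two-pass walk-then-compress.
-- outside the precondition, e.g. on itineraries_v3([1], {1: [(-1, 7)]}, [[]], 1): A returns [0], B returns [0]; on itineraries_v3([1, 2], {1: []}, [[(2, 9)], []], 1): A returns [0], B returns [0]
import Mathlib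
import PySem

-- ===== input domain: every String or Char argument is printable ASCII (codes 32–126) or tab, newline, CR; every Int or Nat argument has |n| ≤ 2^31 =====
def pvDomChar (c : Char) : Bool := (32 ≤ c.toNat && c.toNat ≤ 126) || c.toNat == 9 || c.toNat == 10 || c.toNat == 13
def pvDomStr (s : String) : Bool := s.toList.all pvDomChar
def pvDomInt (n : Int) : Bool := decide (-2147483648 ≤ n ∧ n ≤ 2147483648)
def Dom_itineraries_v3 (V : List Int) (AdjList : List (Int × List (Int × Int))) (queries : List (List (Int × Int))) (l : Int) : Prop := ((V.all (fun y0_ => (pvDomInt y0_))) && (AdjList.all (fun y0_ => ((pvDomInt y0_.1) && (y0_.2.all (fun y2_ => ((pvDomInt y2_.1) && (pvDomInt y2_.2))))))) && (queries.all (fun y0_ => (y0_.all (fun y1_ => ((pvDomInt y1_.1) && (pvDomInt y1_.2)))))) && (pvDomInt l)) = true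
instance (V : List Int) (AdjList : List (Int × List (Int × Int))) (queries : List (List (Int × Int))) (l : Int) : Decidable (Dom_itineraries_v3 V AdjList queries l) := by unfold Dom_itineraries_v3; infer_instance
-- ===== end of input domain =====

-- B splits A's single recursive Tarjan DFS into two staged passes — stage 1 builds the
-- DFS schedule as a flat event list with an explicit stack, stage 2 replays the events —
-- and replaces A's recursive path-compressing find by an iterative walk-then-compress;
-- same cost (objective: alternative).  The Python A mutates nothing observable by the
-- caller (all lists it writes are locals), so the equivalence is about the return value.

-- The mutable state of the Python program A: parent / noise / vertexSeen / result / LCA.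
structure PvSt where
  parent : List Int
  noise  : List Int
  seen   : List Bool
  result : List Int
  lca    : List (List (Int × Int × Int))
deriving Repr, DecidableEq

-- Python dict lookup AdjList[u] (first match; [] outside Pre_, where Python raises KeyError)
def pvAdjOf (ad : List (Int × List (Int × Int))) (v : Int) : List (Int × Int) :=
  PySem.Dict.getD (PySem.Dict.mk ad) v []

-- ===== PORT A =====

-- find_v3: recursive path compression; fuel = len(parent)+1 (never exhausted under Pre_)
def pvFindA : Nat → List Int → List Int → Int → Int × List Int × List Int
  | 0, pa, no, v => (v, pa, no)
  | f+1, pa, no, v =>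
    let p := PySem.List.pyGetD pa (v - 1) 0
    if p = v then (v, pa, no)
    else
      let rs := pvFindA f pa no p
      let no2 := if p ≠ rs.1 then
          PySem.List.pySetD rs.2.2 (v - 1)
            (max (PySem.List.pyGetD rs.2.2 (p - 1) 0) (PySem.List.pyGetD rs.2.2 (v - 1) 0))
        else rs.2.2
      (rs.1, PySem.List.pySetD rs.2.1 (v - 1) rs.1, no2)

-- the tail of TarjanLCA after the neighbour loop: vertexSeen, the query loop, the LCA loop
def pvPhasesA (qs : List (List (Int × Int))) (u : Int) (s : PvSt) : PvSt :=
  let s := { s with seen := PySem.List.pySetD s.seen (u - 1) true }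
  let s := (PySem.List.pyGetD qs (u - 1) []).foldl (fun s vi =>
    if PySem.List.pyGetD s.seen (vi.1 - 1) false then
      let fr := pvFindA (s.parent.length + 1) s.parent s.noise vi.1
      { s with parent := fr.2.1, noise := fr.2.2,
               lca := PySem.List.pySetD s.lca (fr.1 - 1)
                        (PySem.List.pyGetD s.lca (fr.1 - 1) [] ++ [(u, vi.1, vi.2)]) }
    else s) s
  (PySem.List.pyGetD s.lca (u - 1) []).foldl (fun s xyi =>
    if xyi.1 = xyi.2.1 then { s with result := PySem.List.pySetD s.result xyi.2.2 0 }
    else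
      let fr := pvFindA (s.parent.length + 1) s.parent s.noise xyi.1
      let s1 := { s with parent := fr.2.1, noise := fr.2.2 }
      if xyi.2.1 = u then
        { s1 with result := PySem.List.pySetD s1.result xyi.2.2
                              (PySem.List.pyGetD s1.noise (xyi.1 - 1) 0) }
      else
        { s1 with result := PySem.List.pySetD s1.result xyi.2.2
                              (max (PySem.List.pyGetD s1.noise (xyi.1 - 1) 0)
                                   (PySem.List.pyGetD s1.noise (xyi.2.1 - 1) 0)) }) s

-- TarjanLCA's neighbour loop (rem = what is left of AdjList[u]); global gas is a
-- totality guard ticking once per step — never exhausted on inputs Python terminates on.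
-- The child's entry assignment parent[v-1]=v is done at the call site; 'min' is a
-- termination guard and never binds (gas only decreases, see pvBodyA_gas_le).
def pvBodyA (ad : List (Int × List (Int × Int))) (qs : List (List (Int × Int)))
    (g : Nat) (u p : Int) (rem : List (Int × Int)) (s : PvSt) : Option (Nat × PvSt) :=
  match g with
  | 0 => none
  | g'+1 =>
    match rem with
    | [] => some (g', pvPhasesA qs u s)
    | (v, w) :: rem' =>
      if v = p then pvBodyA ad qs g' u p rem' s
      else
        let s2 := { s with noise := PySem.List.pySetD s.noise (v - 1) w,
                           parent := PySem.List.pySetD s.parent (v - 1) v }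
        match pvBodyA ad qs g' v u (pvAdjOf ad v) s2 with
        | none => none
        | some gs =>
          pvBodyA ad qs (min gs.1 g') u p rem'
            { gs.2 with parent := PySem.List.pySetD gs.2.parent (v - 1) u }
termination_by g
decreasing_by
  · omega
  · omega
  · exact Nat.lt_succ_of_le (Nat.min_le_right _ _)

def itineraries_v3 (V : List Int) (AdjList : List (Int × List (Int × Int))) (queries : List (List (Int × Int))) (l : Int) : List Int :=
  let n := V.length
  let u0 := PySem.List.pyGetD V 0 0
  let s0 : PvSt := ⟨List.replicate n (-1), List.replicate n 0, List.replicate n false,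
                    List.replicate l.toNat 0, List.replicate n []⟩
  let s1 := { s0 with parent := PySem.List.pySetD s0.parent (u0 - 1) u0 }
  match pvBodyA AdjList queries 4294967296 u0 (-1) (pvAdjOf AdjList u0) s1 with
  | none => []
  | some gs => gs.2.result

-- ===== PORT B =====

-- the event alphabet of Source B's schedule: tags (1,v,w) / (0,v,_) / (2,v,u) / (3,u,_)
inductive PvEvt
  | noise : Int → Int → PvEvt    -- (1,v,w): noise[v-1] = w
  | enter : Int → PvEvt          -- (0,v,_): parent[v-1] = v
  | par   : Int → Int → PvEvt    -- (2,v,u): parent[v-1] = u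
  | fin   : Int → PvEvt          -- (3,u,_): finish u
deriving Repr, DecidableEq

-- stage 1: the explicit-stack machine producing the schedule; a frame is
-- (vertex, caller, next neighbour index); gas ticks once per pop — a totality guard
def pvSchedB (ad : List (Int × List (Int × Int))) :
    Nat → List (Int × Int × Nat) → List PvEvt → Option (List PvEvt)
  | _, [], acc => some acc
  | 0, _ :: _, _ => none
  | g+1, (u, p, k) :: rest, acc =>
    match (pvAdjOf ad u)[k]? with
    | some vw =>
      if vw.1 = p then pvSchedB ad g ((u, p, k+1) :: rest) acc
      else pvSchedB ad g ((vw.1, u, 0) :: (u, p, k+1) :: rest)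
             (acc ++ [PvEvt.noise vw.1 vw.2, PvEvt.enter vw.1])
    | none =>
      let acc2 := acc ++ [PvEvt.fin u]
      match rest with
      | [] => pvSchedB ad g [] acc2
      | fr :: _ => pvSchedB ad g rest (acc2 ++ [PvEvt.par u fr.1])
termination_by g _ _ => g

-- stage 2's state: the five arrays as a plain tuple (parent, noise, seen, result, LCA)
abbrev PvSt5 := List Int × List Int × List Bool × List Int × List (List (Int × Int × Int))

-- iterative find, pass 1: walk to the representative recording (vertex, parent) pairs
def pvWalkB (f : Nat) (pa : List Int) (v : Int) : List (Int × Int) × Int :=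
  match f with
  | 0 => ([], v)
  | f+1 =>
    let p := PySem.List.pyGetD pa (v - 1) 0
    if p = v then ([], v)
    else
      let cr := pvWalkB f pa p
      ((v, p) :: cr.1, cr.2)

-- pass 2: compress top-down (the reversed(chain) loop of Source B)
def pvCompB : List (Int × Int) → Int → List Int → List Int → List Int × List Int
  | [], _, pa, no => (pa, no)
  | (v, p) :: c, r, pa, no =>
    let pn := pvCompB c r pa no
    let no2 := if p ≠ r then
        PySem.List.pySetD pn.2 (v - 1)
          (max (PySem.List.pyGetD pn.2 (p - 1) 0) (PySem.List.pyGetD pn.2 (v - 1) 0))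
      else pn.2
    (PySem.List.pySetD pn.1 (v - 1) r, no2)

def pvFindB (f : Nat) (pa no : List Int) (v : Int) : Int × List Int × List Int :=
  let cr := pvWalkB f pa v
  let pn := pvCompB cr.1 cr.2 pa no
  (cr.2, pn.1, pn.2)

-- replay of one fired query entry (the LCA-bucket insertion)
def pvFireB (u : Int) (st : PvSt5) (vi : Int × Int) : PvSt5 :=
  let fr := pvFindB (st.1.length + 1) st.1 st.2.1 vi.1
  (fr.2.1, fr.2.2, st.2.2.1, st.2.2.2.1,
   PySem.List.pySetD st.2.2.2.2 (fr.1 - 1)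
     (PySem.List.pyGetD st.2.2.2.2 (fr.1 - 1) [] ++ [(u, vi.1, vi.2)]))

-- replay of one LCA-bucket entry (the answer write)
def pvAnsB (u : Int) (st : PvSt5) (t : Int × Int × Int) : PvSt5 :=
  if t.1 = t.2.1 then
    (st.1, st.2.1, st.2.2.1, PySem.List.pySetD st.2.2.2.1 t.2.2 0, st.2.2.2.2)
  else
    let fr := pvFindB (st.1.length + 1) st.1 st.2.1 t.1
    let r := if t.2.1 = u then PySem.List.pyGetD fr.2.2 (t.1 - 1) 0
             else max (PySem.List.pyGetD fr.2.2 (t.1 - 1) 0)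
                      (PySem.List.pyGetD fr.2.2 (t.2.1 - 1) 0)
    (fr.2.1, fr.2.2, st.2.2.1, PySem.List.pySetD st.2.2.2.1 t.2.2 r, st.2.2.2.2)

-- replay of a finish event: mark seen, filter the fired entries, answer the bucket
def pvFinB (qs : List (List (Int × Int))) (u : Int) (st : PvSt5) : PvSt5 :=
  let sn := PySem.List.pySetD st.2.2.1 (u - 1) true
  let fired := (PySem.List.pyGetD qs (u - 1) []).filter
                 (fun vi => PySem.List.pyGetD sn (vi.1 - 1) false)
  let st1 := fired.foldl (pvFireB u) (st.1, st.2.1, sn, st.2.2.2.1, st.2.2.2.2)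
  (PySem.List.pyGetD st1.2.2.2.2 (u - 1) []).foldl (pvAnsB u) st1

-- stage 2: replay the whole schedule
def pvRunB (qs : List (List (Int × Int))) (E : List PvEvt) (st : PvSt5) : PvSt5 :=
  E.foldl (fun st e =>
    match e with
    | .noise v w => (st.1, PySem.List.pySetD st.2.1 (v - 1) w, st.2.2.1, st.2.2.2.1, st.2.2.2.2)
    | .enter v => (PySem.List.pySetD st.1 (v - 1) v, st.2.1, st.2.2.1, st.2.2.2.1, st.2.2.2.2)
    | .par v u => (PySem.List.pySetD st.1 (v - 1) u, st.2.1, st.2.2.1, st.2.2.2.1, st.2.2.2.2)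
    | .fin u => pvFinB qs u st) st

def itineraries_v3_alt (V : List Int) (AdjList : List (Int × List (Int × Int))) (queries : List (List (Int × Int))) (l : Int) : List Int :=
  let n := V.length
  let u0 := PySem.List.pyGetD V 0 0
  match pvSchedB AdjList 4294967296 [(u0, -1, 0)] [] with
  | none => []
  | some E =>
    (pvRunB queries E
      (PySem.List.pySetD (List.replicate n (-1)) (u0 - 1) u0, List.replicate n 0,
       List.replicate n false, List.replicate l.toNat 0, List.replicate n [])).2.2.2.1

-- ===== PRECONDITION & SPEC =====

-- helpers of Pre_: the set of DFS steps (u, v) the traversal can take, as a closure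
def pvSlotOk (n : Nat) (v : Int) : Bool := decide (-(n : Int) ≤ v - 1 ∧ v - 1 < (n : Int))
def pvAddPair (S : List (Int × Int)) (p : Int × Int) : List (Int × Int) :=
  if p ∈ S then S else S ++ [p]
def pvExpand (ad : List (Int × List (Int × Int))) (S : List (Int × Int)) : List (Int × Int) :=
  S.foldl (fun acc uv =>
    (pvAdjOf ad uv.2).foldl (fun acc vw =>
      if vw.1 = uv.1 then acc else pvAddPair acc (uv.2, vw.1)) acc) S
def pvSteps (ad : List (Int × List (Int × Int))) (u0 : Int) : List (Int × Int) :=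
  let init := (pvAdjOf ad u0).foldl (fun acc vw =>
    if vw.1 = -1 then acc else pvAddPair acc (u0, vw.1)) []
  (pvExpand ad)^[ad.foldl (fun a kv => a + kv.2.length) 0 + 1] init

-- Pre_ excludes exactly the inputs on which the Python A raises or recurses forever
-- (empty V, a missing AdjList key, an index out of wraparound range, a re-entered
-- vertex — which corrupts the union-find — or a non-terminating traversal), plus a
-- small conservative margin: it also demands in-range slots and result indices for
-- neighbour/query entries that A merely skips over, so a few inputs on which A does
-- return are excluded although both programs return the same value there (see the cites).
def Pre_itineraries_v3 (V : List Int) (AdjList : List (Int × List (Int × Int))) (queries : List (List (Int × Int))) (l : Int) : Prop :=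
  (match V with
  | [] => false
  | u0 :: _ =>
    let n := V.length
    let nq := queries.length
    let keys := AdjList.map (·.1)
    let S := pvSteps AdjList u0
    let tg := S.map (·.2)
    let vis := u0 :: tg
    decide (u0 ∈ keys) &&
    decide (u0 ∉ tg) &&
    decide tg.Nodup &&
    vis.all (fun u =>
      decide (u ∈ keys) && pvSlotOk n u &&
      decide (-(nq : Int) ≤ u - 1 ∧ u - 1 < (nq : Int)) &&
      (pvAdjOf AdjList u).all (fun vw => pvSlotOk n vw.1)) &&
    decide (vis.map (fun u => (u - 1) % (n : Int))).Nodup &&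
    vis.all (fun u =>
      (PySem.List.pyGetD queries (u - 1) []).all (fun vi =>
        pvSlotOk n vi.1 && decide (-l ≤ vi.2 ∧ vi.2 < l)))) = true
instance (V : List Int) (AdjList : List (Int × List (Int × Int))) (queries : List (List (Int × Int))) (l : Int) : Decidable (Pre_itineraries_v3 V AdjList queries l) := by unfold Pre_itineraries_v3; infer_instance

def pvWitness_itineraries_v3 : List Int × (List (Int × List (Int × Int))) × (List (List (Int × Int))) × Int :=
  ([1, 2], [(1, [(2, 5)]), (2, [(1, 5)])], [[(2, 0)], [(1, 0)]], 1)

def Spec_itineraries_v3 (V : List Int) (AdjList : List (Int × List (Int × Int))) (queries : List (List (Int × Int))) (l : Int) (out : List Int) : Prop := out = itineraries_v3_alt V AdjList queries l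
instance (V : List Int) (AdjList : List (Int × List (Int × Int))) (queries : List (List (Int × Int))) (l : Int) (out : List Int) : Decidable (Spec_itineraries_v3 V AdjList queries l out) := by unfold Spec_itineraries_v3; infer_instance

-- ===== CLAIM (what is proved, stated in full; the proofs are below) =====
def Claim_equal_itineraries_v3 : Prop := ∀ (V : List Int) (AdjList : List (Int × List (Int × Int))) (queries : List (List (Int × Int))) (l : Int), Dom_itineraries_v3 V AdjList queries l → Pre_itineraries_v3 V AdjList queries l → Spec_itineraries_v3 V AdjList queries l (itineraries_v3 V AdjList queries l)

-- ===== LEMMAS AND PROOFS =====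

-- the two finds agree (for every fuel, on every state)
theorem pvFindB_eq (f : Nat) : ∀ (pa no : List Int) (v : Int),
    pvFindB f pa no v = pvFindA f pa no v := by
  induction f with
  | zero => intro pa no v; rfl
  | succ f ih =>
    intro pa no v
    simp only [pvFindB, pvWalkB, pvFindA]
    by_cases h : PySem.List.pyGetD pa (v - 1) 0 = v
    · simp [h, pvCompB]
    · simp only [h, if_false]
      have := ih pa no (PySem.List.pyGetD pa (v - 1) 0)
      simp only [pvFindB] at this
      simp only [pvCompB]
      rw [← this]

-- the tuple view of A's state
def pvOf (s : PvSt) : PvSt5 := (s.parent, s.noise, s.seen, s.result, s.lca)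

-- B's filtered fired fold equals A's guarded query fold (the fire step never changes seen)
theorem pvFireFold (u : Int) (sn0 : List Bool) :
    ∀ (L : List (Int × Int)) (s : PvSt), s.seen = sn0 →
      (L.filter (fun vi => PySem.List.pyGetD sn0 (vi.1 - 1) false)).foldl (pvFireB u) (pvOf s)
        = pvOf (L.foldl (fun s vi =>
            if PySem.List.pyGetD s.seen (vi.1 - 1) false then
              let fr := pvFindA (s.parent.length + 1) s.parent s.noise vi.1
              { s with parent := fr.2.1, noise := fr.2.2,
                       lca := PySem.List.pySetD s.lca (fr.1 - 1)
                                (PySem.List.pyGetD s.lca (fr.1 - 1) [] ++ [(u, vi.1, vi.2)]) }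
            else s) s) := by
  intro L
  induction L with
  | nil => intro s _; rfl
  | cons vi L ih =>
    intro s hs
    by_cases h : PySem.List.pyGetD sn0 (vi.1 - 1) false = true
    · have h' : PySem.List.pyGetD s.seen (vi.1 - 1) false = true := by rw [hs]; exact h
      simp only [List.filter_cons, h, if_true, List.foldl_cons, if_pos h']
      have hstep : pvFireB u (pvOf s) vi
          = pvOf { s with
              parent := (pvFindA (s.parent.length + 1) s.parent s.noise vi.1).2.1,
              noise := (pvFindA (s.parent.length + 1) s.parent s.noise vi.1).2.2,
              lca := PySem.List.pySetD s.lca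
                       ((pvFindA (s.parent.length + 1) s.parent s.noise vi.1).1 - 1)
                       (PySem.List.pyGetD s.lca
                         ((pvFindA (s.parent.length + 1) s.parent s.noise vi.1).1 - 1) []
                        ++ [(u, vi.1, vi.2)]) } := by
        simp [pvFireB, pvOf, pvFindB_eq]
      rw [hstep]
      exact ih _ hs
    · have h' : ¬ PySem.List.pyGetD s.seen (vi.1 - 1) false = true := by rw [hs]; exact h
      simp only [List.filter_cons, h, List.foldl_cons, if_neg h']
      exact ih s hs

-- B's answer fold equals A's LCA fold
theorem pvAnsFold (u : Int) :
    ∀ (L : List (Int × Int × Int)) (s : PvSt),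
      L.foldl (pvAnsB u) (pvOf s)
        = pvOf (L.foldl (fun s xyi =>
            if xyi.1 = xyi.2.1 then { s with result := PySem.List.pySetD s.result xyi.2.2 0 }
            else
              let fr := pvFindA (s.parent.length + 1) s.parent s.noise xyi.1
              let s1 := { s with parent := fr.2.1, noise := fr.2.2 }
              if xyi.2.1 = u then
                { s1 with result := PySem.List.pySetD s1.result xyi.2.2
                                      (PySem.List.pyGetD s1.noise (xyi.1 - 1) 0) }
              else
                { s1 with result := PySem.List.pySetD s1.result xyi.2.2
                                      (max (PySem.List.pyGetD s1.noise (xyi.1 - 1) 0)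
                                           (PySem.List.pyGetD s1.noise (xyi.2.1 - 1) 0)) }) s) := by
  intro L
  induction L with
  | nil => intro s; rfl
  | cons t L ih =>
    intro s
    simp only [List.foldl_cons]
    by_cases h : t.1 = t.2.1
    · have : pvAnsB u (pvOf s) t
          = pvOf { s with result := PySem.List.pySetD s.result t.2.2 0 } := by
        simp only [pvAnsB, pvOf, if_pos h]
      rw [this]; simp only [if_pos h]; exact ih _
    · by_cases hy : t.2.1 = u
      · have : pvAnsB u (pvOf s) t
            = pvOf { s with
                parent := (pvFindA (s.parent.length + 1) s.parent s.noise t.1).2.1,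
                noise := (pvFindA (s.parent.length + 1) s.parent s.noise t.1).2.2,
                result := PySem.List.pySetD s.result t.2.2
                  (PySem.List.pyGetD (pvFindA (s.parent.length + 1) s.parent s.noise t.1).2.2
                    (t.1 - 1) 0) } := by
          simp only [pvAnsB, pvOf, pvFindB_eq, if_neg h, if_pos hy]
        rw [this]; simp only [if_neg h, if_pos hy]; exact ih _
      · have : pvAnsB u (pvOf s) t
            = pvOf { s with
                parent := (pvFindA (s.parent.length + 1) s.parent s.noise t.1).2.1,
                noise := (pvFindA (s.parent.length + 1) s.parent s.noise t.1).2.2,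
                result := PySem.List.pySetD s.result t.2.2
                  (max (PySem.List.pyGetD (pvFindA (s.parent.length + 1) s.parent s.noise t.1).2.2 (t.1 - 1) 0)
                       (PySem.List.pyGetD (pvFindA (s.parent.length + 1) s.parent s.noise t.1).2.2 (t.2.1 - 1) 0)) } := by
          simp only [pvAnsB, pvOf, pvFindB_eq, if_neg h, if_neg hy]
        rw [this]; simp only [if_neg h, if_neg hy]; exact ih _

-- a finish event replays exactly A's phases
theorem pvFinB_eq (qs : List (List (Int × Int))) (u : Int) (s : PvSt) :
    pvFinB qs u (pvOf s) = pvOf (pvPhasesA qs u s) := by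
  have h1 := pvFireFold u (PySem.List.pySetD s.seen (u - 1) true)
      (PySem.List.pyGetD qs (u - 1) [])
      { s with seen := PySem.List.pySetD s.seen (u - 1) true } rfl
  show (PySem.List.pyGetD (((PySem.List.pyGetD qs (u - 1) []).filter
          (fun vi => PySem.List.pyGetD (PySem.List.pySetD s.seen (u - 1) true) (vi.1 - 1) false)).foldl
          (pvFireB u) (pvOf { s with seen := PySem.List.pySetD s.seen (u - 1) true })).2.2.2.2 (u - 1) []).foldl
        (pvAnsB u)
        (((PySem.List.pyGetD qs (u - 1) []).filter
          (fun vi => PySem.List.pyGetD (PySem.List.pySetD s.seen (u - 1) true) (vi.1 - 1) false)).foldl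
          (pvFireB u) (pvOf { s with seen := PySem.List.pySetD s.seen (u - 1) true }))
      = _
  rw [h1, pvAnsFold]
  rfl

-- A-semantics event interpreter (proof-layer only)
def pvRunA (qs : List (List (Int × Int))) (E : List PvEvt) (s : PvSt) : PvSt :=
  E.foldl (fun s e =>
    match e with
    | .noise v w => { s with noise := PySem.List.pySetD s.noise (v - 1) w }
    | .enter v => { s with parent := PySem.List.pySetD s.parent (v - 1) v }
    | .par v u => { s with parent := PySem.List.pySetD s.parent (v - 1) u }
    | .fin u => pvPhasesA qs u s) s

theorem pvRunA_append (qs : List (List (Int × Int))) (E1 E2 : List PvEvt) (s : PvSt) :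
    pvRunA qs (E1 ++ E2) s = pvRunA qs E2 (pvRunA qs E1 s) := by
  unfold pvRunA; rw [List.foldl_append]

-- replaying any schedule on the tuple state tracks replaying it on A's state
theorem pvRunB_eq (qs : List (List (Int × Int))) :
    ∀ (E : List PvEvt) (s : PvSt), pvRunB qs E (pvOf s) = pvOf (pvRunA qs E s) := by
  intro E
  induction E with
  | nil => intro s; rfl
  | cons e E ih =>
    intro s
    have h1 : pvRunB qs (e :: E) (pvOf s)
        = pvRunB qs E ((fun st (e : PvEvt) =>
            match e with
            | .noise v w => (st.1, PySem.List.pySetD st.2.1 (v - 1) w, st.2.2.1, st.2.2.2.1, st.2.2.2.2)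
            | .enter v => (PySem.List.pySetD st.1 (v - 1) v, st.2.1, st.2.2.1, st.2.2.2.1, st.2.2.2.2)
            | .par v u => (PySem.List.pySetD st.1 (v - 1) u, st.2.1, st.2.2.1, st.2.2.2.1, st.2.2.2.2)
            | .fin u => pvFinB qs u st) (pvOf s) e) := rfl
    rw [h1]
    have h2 : pvRunA qs (e :: E) s
        = pvRunA qs E ((fun s (e : PvEvt) =>
            match e with
            | .noise v w => { s with noise := PySem.List.pySetD s.noise (v - 1) w }
            | .enter v => { s with parent := PySem.List.pySetD s.parent (v - 1) v }
            | .par v u => { s with parent := PySem.List.pySetD s.parent (v - 1) u }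
            | .fin u => pvPhasesA qs u s) s e) := rfl
    rw [h2]
    cases e with
    | noise v w => exact ih { s with noise := PySem.List.pySetD s.noise (v - 1) w }
    | enter v => exact ih { s with parent := PySem.List.pySetD s.parent (v - 1) v }
    | par v u => exact ih { s with parent := PySem.List.pySetD s.parent (v - 1) u }
    | fin u =>
      have h3 := ih (pvPhasesA qs u s)
      rw [← pvFinB_eq qs u s] at h3
      exact h3

-- A's neighbour loop, events only (proof-layer mirror of pvBodyA)
def pvEvA (ad : List (Int × List (Int × Int))) :
    Nat → Int → Int → List (Int × Int) → Option (Nat × List PvEvt)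
  | 0, _, _, _ => none
  | g'+1, u, p, rem =>
    match rem with
    | [] => some (g', [PvEvt.fin u])
    | (v, w) :: rem' =>
      if v = p then pvEvA ad g' u p rem'
      else
        match pvEvA ad g' v u (pvAdjOf ad v) with
        | none => none
        | some g1E =>
          match pvEvA ad (min g1E.1 g') u p rem' with
          | none => none
          | some g2E =>
            some (g2E.1, [PvEvt.noise v w, PvEvt.enter v] ++ g1E.2 ++ [PvEvt.par v u] ++ g2E.2)
termination_by g _ _ _ => g
decreasing_by
  · omega
  · omega
  · exact Nat.lt_succ_of_le (Nat.min_le_right _ _)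

theorem pvEvA_gas_le (ad : List (Int × List (Int × Int))) :
    ∀ (g : Nat) (u p : Int) (rem : List (Int × Int)) (gE : Nat × List PvEvt),
      pvEvA ad g u p rem = some gE → gE.1 ≤ g := by
  intro g
  induction g using Nat.strong_induction_on with
  | _ g ih =>
    intro u p rem gE h
    match g with
    | 0 => simp [pvEvA] at h
    | g'+1 =>
      match rem with
      | [] =>
        simp only [pvEvA] at h
        cases h; simp
      | (v, w) :: rem' =>
        rw [pvEvA] at h
        by_cases hvp : v = p
        · simp only [hvp, if_true] at h
          exact le_trans (ih g' (by omega) _ _ _ _ h) (by omega)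
        · simp only [if_neg hvp] at h
          rcases h1 : pvEvA ad g' v u (pvAdjOf ad v) with _ | g1E
          · rw [h1] at h; simp at h
          · rw [h1] at h
            dsimp only at h
            rcases h2 : pvEvA ad (min g1E.1 g') u p rem' with _ | g2E
            · rw [h2] at h; simp at h
            · rw [h2] at h
              dsimp only at h
              cases h
              have := ih (min g1E.1 g') (by omega) _ _ _ _ h2
              omega

-- A's loop is: compute the events, then replay them with A's semantics
theorem pvBodyA_ev (ad : List (Int × List (Int × Int))) (qs : List (List (Int × Int))) :
    ∀ (g : Nat) (u p : Int) (rem : List (Int × Int)) (s : PvSt),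
      pvBodyA ad qs g u p rem s
        = (pvEvA ad g u p rem).map (fun gE => (gE.1, pvRunA qs gE.2 s)) := by
  intro g
  induction g using Nat.strong_induction_on with
  | _ g ih =>
    intro u p rem s
    match g with
    | 0 => simp [pvBodyA, pvEvA]
    | g'+1 =>
      match rem with
      | [] =>
        rw [pvBodyA, pvEvA]
        simp [pvRunA]
      | (v, w) :: rem' =>
        rw [pvBodyA, pvEvA]
        by_cases hvp : v = p
        · simp only [hvp, if_true]
          exact ih g' (by omega) u p rem' s
        · simp only [if_neg hvp]
          rw [ih g' (by omega) v u (pvAdjOf ad v)]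
          rcases h1 : pvEvA ad g' v u (pvAdjOf ad v) with _ | g1E
          · simp
          · simp only [Option.map_some]
            rw [ih (min g1E.1 g') (by omega) u p rem']
            rcases h2 : pvEvA ad (min g1E.1 g') u p rem' with _ | g2E
            · simp
            · simp only [Option.map_some]
              have hrw : pvRunA qs ([PvEvt.noise v w, PvEvt.enter v] ++ g1E.2 ++ [PvEvt.par v u] ++ g2E.2) s
                  = pvRunA qs g2E.2
                      { (pvRunA qs g1E.2
                          { s with noise := PySem.List.pySetD s.noise (v - 1) w,
                                   parent := PySem.List.pySetD s.parent (v - 1) v }) with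
                        parent := PySem.List.pySetD
                          (pvRunA qs g1E.2
                            { s with noise := PySem.List.pySetD s.noise (v - 1) w,
                                     parent := PySem.List.pySetD s.parent (v - 1) v }).parent
                          (v - 1) u } := by
                rw [pvRunA_append, pvRunA_append, pvRunA_append]
                rfl
              rw [hrw]

-- the stack machine produces exactly the events of A's recursion, frame by frame
theorem pvSchedB_eq (ad : List (Int × List (Int × Int))) :
    ∀ (g : Nat) (u p : Int) (k : Nat) (rest : List (Int × Int × Nat)) (acc : List PvEvt),
      pvSchedB ad g ((u, p, k) :: rest) acc
        = (pvEvA ad g u p ((pvAdjOf ad u).drop k)).bind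
            (fun gE => pvSchedB ad gE.1 rest
              (acc ++ gE.2 ++ (match rest with | [] => [] | fr :: _ => [PvEvt.par u fr.1]))) := by
  intro g
  induction g using Nat.strong_induction_on with
  | _ g ih =>
    intro u p k rest acc
    match g with
    | 0 => simp [pvSchedB, pvEvA]
    | g'+1 =>
      rw [pvSchedB]
      rcases hk : (pvAdjOf ad u)[k]? with _ | vw
      · -- neighbours exhausted
        have hdrop : (pvAdjOf ad u).drop k = [] := by
          rw [List.drop_eq_nil_iff]
          exact le_of_not_gt (fun hlt => by simp [List.getElem?_eq_getElem hlt] at hk)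
        rw [hdrop, pvEvA]
        cases rest with
        | nil => simp [pvSchedB]
        | cons fr rest' => simp [List.append_assoc]
      · have hklt : k < (pvAdjOf ad u).length := by
          by_contra hge
          simp [List.getElem?_eq_none_iff.mpr (le_of_not_gt hge)] at hk
        have hdrop : (pvAdjOf ad u).drop k = vw :: (pvAdjOf ad u).drop (k + 1) := by
          rw [List.drop_eq_getElem_cons hklt]
          have : (pvAdjOf ad u)[k] = vw := by
            have := List.getElem?_eq_getElem hklt
            rw [hk] at this; exact (Option.some_injective _ this.symm)
          rw [this]
        rw [hdrop, pvEvA]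
        by_cases hvp : vw.1 = p
        · simp only [hvp, if_true]
          rw [ih g' (by omega) u p (k + 1) rest acc]
        · simp only [if_neg hvp]
          rw [ih g' (by omega) vw.1 u 0 ((u, p, k + 1) :: rest)
                (acc ++ [PvEvt.noise vw.1 vw.2, PvEvt.enter vw.1])]
          simp only [List.drop_zero]
          rcases h1 : pvEvA ad g' vw.1 u (pvAdjOf ad vw.1) with _ | g1E
          · simp
          · simp only [Option.bind_some]
            have hle : g1E.1 ≤ g' := pvEvA_gas_le ad g' vw.1 u _ _ h1
            rw [ih g1E.1 (by omega) u p (k + 1) rest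
                  (acc ++ [PvEvt.noise vw.1 vw.2, PvEvt.enter vw.1] ++ g1E.2 ++ [PvEvt.par vw.1 u])]
            rw [Nat.min_eq_left hle]
            rcases h2 : pvEvA ad g1E.1 u p ((pvAdjOf ad u).drop (k + 1)) with _ | g2E
            · simp
            · simp [List.append_assoc]

-- the two ports agree on every input
theorem pvMain (V : List Int) (AdjList : List (Int × List (Int × Int)))
    (queries : List (List (Int × Int))) (l : Int) :
    itineraries_v3 V AdjList queries l = itineraries_v3_alt V AdjList queries l := by
  show (match pvBodyA AdjList queries 4294967296 (PySem.List.pyGetD V 0 0) (-1)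
          (pvAdjOf AdjList (PySem.List.pyGetD V 0 0))
          { parent := PySem.List.pySetD (List.replicate V.length (-1)) (PySem.List.pyGetD V 0 0 - 1) (PySem.List.pyGetD V 0 0),
            noise := List.replicate V.length 0, seen := List.replicate V.length false,
            result := List.replicate l.toNat 0, lca := List.replicate V.length [] } with
        | none => []
        | some gs => gs.2.result)
      = (match pvSchedB AdjList 4294967296 [(PySem.List.pyGetD V 0 0, -1, 0)] [] with
        | none => []
        | some E =>
          (pvRunB queries E
            (PySem.List.pySetD (List.replicate V.length (-1)) (PySem.List.pyGetD V 0 0 - 1) (PySem.List.pyGetD V 0 0),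
             List.replicate V.length 0, List.replicate V.length false,
             List.replicate l.toNat 0, List.replicate V.length [])).2.2.2.1)
  rw [pvSchedB_eq AdjList 4294967296 (PySem.List.pyGetD V 0 0) (-1) 0 [] []]
  rw [pvBodyA_ev]
  simp only [List.drop_zero]
  rcases h : pvEvA AdjList 4294967296 (PySem.List.pyGetD V 0 0) (-1) (pvAdjOf AdjList (PySem.List.pyGetD V 0 0)) with _ | gE
  · rfl
  · simp only [Option.map_some, Option.bind_some, pvSchedB, List.nil_append, List.append_nil]
    rw [show (PySem.List.pySetD (List.replicate V.length (-1)) (PySem.List.pyGetD V 0 0 - 1) (PySem.List.pyGetD V 0 0),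
          List.replicate V.length (0 : Int), List.replicate V.length false,
          List.replicate l.toNat (0 : Int), List.replicate V.length ([] : List (Int × Int × Int)))
        = pvOf { parent := PySem.List.pySetD (List.replicate V.length (-1)) (PySem.List.pyGetD V 0 0 - 1) (PySem.List.pyGetD V 0 0),
                 noise := List.replicate V.length 0, seen := List.replicate V.length false,
                 result := List.replicate l.toNat 0, lca := List.replicate V.length [] } from rfl]
    rw [pvRunB_eq]
    rfl

-- ===== VERDICT (by name: the statement is the Claim_ definition above) =====
theorem itineraries_v3_spec : Claim_equal_itineraries_v3 := by
  intro V AdjList queries l _ _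
  unfold Spec_itineraries_v3
  exact pvMain V AdjList queries l
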